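-- pv_equiv track=rewrite | github.com/hapax-systems/hapax-council | shared/world_surface_health.py | _derived_overall_status
-- ===== SOURCE A (Python) =====
-- from enum import StrEnum
--
-- class HealthStatus(StrEnum):
--     HEALTHY = "healthy"
--     DEGRADED = "degraded"
--     BLOCKED = "blocked"
--     UNSAFE = "unsafe"
--     STALE = "stale"
--     MISSING = "missing"
--     UNKNOWN = "unknown"
--     PRIVATE_ONLY = "private_only"
--     DRY_RUN = "dry_run"
--     QUIET_OFF_AIR = "quiet_off_air"
--     CANDIDATE = "candidate"
--
-- class EnvelopeStatus(StrEnum):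
--     HEALTHY = "healthy"
--     DEGRADED = "degraded"
--     BLOCKED = "blocked"
--     UNSAFE = "unsafe"
--     UNKNOWN = "unknown"
--
-- def _derived_overall_status(statuses: list[HealthStatus]) -> EnvelopeStatus:
--     if HealthStatus.UNSAFE in statuses:
--         return EnvelopeStatus.UNSAFE
--     if any(status in statuses for status in {HealthStatus.BLOCKED, HealthStatus.MISSING}):
--         return EnvelopeStatus.BLOCKED
--     if any(status in statuses for status in {HealthStatus.UNKNOWN, HealthStatus.CANDIDATE}):
--         return EnvelopeStatus.UNKNOWN
--     if any(
--         status in statuses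
--         for status in {
--             HealthStatus.DEGRADED,
--             HealthStatus.STALE,
--             HealthStatus.PRIVATE_ONLY,
--             HealthStatus.DRY_RUN,
--             HealthStatus.QUIET_OFF_AIR,
--         }
--     ):
--         return EnvelopeStatus.DEGRADED
--     return EnvelopeStatus.HEALTHY
-- ===== SOURCE B (Python) =====
-- _RANK = {
--     "unsafe": 0,
--     "blocked": 1, "missing": 1,
--     "unknown": 2, "candidate": 2,
--     "degraded": 3, "stale": 3, "private_only": 3, "dry_run": 3, "quiet_off_air": 3,
-- }
-- _BACK = ["unsafe", "blocked", "unknown", "degraded", "healthy"]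
--
-- def _derived_overall_status(statuses):
--     m = 4
--     for s in statuses:
--         m = min(m, _RANK.get(s, 4))
--     return _BACK[m]
-- ===== Notes on version B (the rewrite author's own statement) =====
-- stated objective: simpler
-- what changed: Replaces the chain of repeated list-membership scans with one pass that takes the minimum severity rank from a lookup table and maps it back to the envelope status.
import Mathlib
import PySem

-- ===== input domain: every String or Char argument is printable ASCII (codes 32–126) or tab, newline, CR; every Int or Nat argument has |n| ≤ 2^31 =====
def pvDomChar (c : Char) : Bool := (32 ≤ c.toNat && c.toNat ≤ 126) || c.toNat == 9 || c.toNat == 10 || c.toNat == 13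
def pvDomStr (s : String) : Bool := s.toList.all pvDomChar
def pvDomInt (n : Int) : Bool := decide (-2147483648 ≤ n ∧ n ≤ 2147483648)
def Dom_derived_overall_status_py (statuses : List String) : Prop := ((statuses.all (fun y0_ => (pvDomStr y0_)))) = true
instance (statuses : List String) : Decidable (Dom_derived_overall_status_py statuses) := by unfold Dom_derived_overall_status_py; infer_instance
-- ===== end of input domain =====

-- ===== PORT A =====
-- B: one table-driven pass taking the minimum severity rank, instead of A's chain of membership scans.
def derived_overall_status_py (statuses : List String) : String :=
  if statuses.contains "unsafe" then "unsafe"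
  else if statuses.contains "blocked" || statuses.contains "missing" then "blocked"
  else if statuses.contains "unknown" || statuses.contains "candidate" then "unknown"
  else if statuses.contains "degraded" || statuses.contains "stale" ||
          statuses.contains "private_only" || statuses.contains "dry_run" ||
          statuses.contains "quiet_off_air" then "degraded"
  else "healthy"

-- ===== PORT B =====
-- _RANK.get(s, 4)
def pvRank (s : String) : Nat :=
  if s = "unsafe" then 0
  else if s = "blocked" then 1 else if s = "missing" then 1
  else if s = "unknown" then 2 else if s = "candidate" then 2
  else if s = "degraded" then 3 else if s = "stale" then 3
  else if s = "private_only" then 3 else if s = "dry_run" then 3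
  else if s = "quiet_off_air" then 3
  else 4

-- _BACK[m] for m ≤ 4
def pvBack (m : Nat) : String :=
  ["unsafe", "blocked", "unknown", "degraded", "healthy"].getD m "healthy"

def derived_overall_status_py_alt (statuses : List String) : String :=
  pvBack (statuses.foldl (fun m s => min m (pvRank s)) 4)

-- ===== PRECONDITION & SPEC =====
def Spec_derived_overall_status_py (statuses : List String) (out : String) : Prop := out = derived_overall_status_py_alt statuses
instance (statuses : List String) (out : String) : Decidable (Spec_derived_overall_status_py statuses out) := by unfold Spec_derived_overall_status_py; infer_instance

-- ===== CLAIM (what is proved, stated in full; the proofs are below) =====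
def Claim_equal_derived_overall_status_py : Prop := ∀ (statuses : List String), Dom_derived_overall_status_py statuses → Spec_derived_overall_status_py statuses (derived_overall_status_py statuses)

-- ===== LEMMAS AND PROOFS =====

-- ===== VERDICT (by name: the statement is the Claim_ definition above) =====
-- A's if-chain, expressed as the minimum severity rank present in the list.
def pvSpecRank (xs : List String) : Nat :=
  if xs.contains "unsafe" then 0
  else if xs.contains "blocked" || xs.contains "missing" then 1
  else if xs.contains "unknown" || xs.contains "candidate" then 2
  else if xs.contains "degraded" || xs.contains "stale" ||
          xs.contains "private_only" || xs.contains "dry_run" ||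
          xs.contains "quiet_off_air" then 3
  else 4

theorem pvFoldl_min_acc (xs : List String) (a : Nat) (ha : a ≤ 4) :
    xs.foldl (fun m s => min m (pvRank s)) a = min a (xs.foldl (fun m s => min m (pvRank s)) 4) := by
  induction xs generalizing a with
  | nil => simp [List.foldl]; omega
  | cons x xs ih =>
    simp only [List.foldl]
    have h4 : pvRank x ≤ 4 := by unfold pvRank; split_ifs <;> omega
    rw [ih (min a (pvRank x)) (by omega), ih (min 4 (pvRank x)) (by omega)]
    omega

theorem pvRank_le_four (x : String) : pvRank x ≤ 4 := by
  unfold pvRank; split_ifs <;> omega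

theorem pvSpecRank_cons (x : String) (xs : List String) :
    pvSpecRank (x :: xs) = min (pvRank x) (pvSpecRank xs) := by
  unfold pvRank
  split_ifs <;>
    simp_all [pvSpecRank, eq_comm (b := x)] <;>
    split_ifs <;> omega

theorem pvFold_eq_specRank (xs : List String) :
    xs.foldl (fun m s => min m (pvRank s)) 4 = pvSpecRank xs := by
  induction xs with
  | nil => rfl
  | cons x xs ih =>
    simp only [List.foldl]
    rw [pvFoldl_min_acc _ _ (by have := pvRank_le_four x; omega), ih, pvSpecRank_cons]
    have := pvRank_le_four x
    omega

theorem derived_overall_status_py_spec : Claim_equal_derived_overall_status_py := by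
  intro statuses _
  unfold Spec_derived_overall_status_py derived_overall_status_py_alt
  rw [pvFold_eq_specRank]
  unfold derived_overall_status_py pvSpecRank pvBack
  split_ifs <;> rfl
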